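-- pv_equiv track=rewrite | github.com/frnzgngbs/F1_PythonExercise | Tres.py | countNumber
-- ===== SOURCE A (Python) =====
-- def countNumber(number):
--     count = 1
--     minimum = number % 10
--     maximum = number % 10
--     number = number // 10
--
--     while number > 0:
--         count = count + 1
--         store = number % 10
--         if minimum > store:
--             minimum = store
--         if maximum < store:
--             maximum = store
--         number = number // 10
--
--     return [count, minimum, maximum]
-- ===== SOURCE B (Python) =====
-- def countNumber(number):
--     digits = [number % 10]
--     number //= 10
--     while number > 0:
--         digits.append(number % 10)
--         number //= 10
--     return [len(digits), min(digits), max(digits)]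
-- ===== Notes on version B (the rewrite author's own statement) =====
-- stated objective: simpler
-- what changed: Instead of tracking count/min/max online inside the extraction loop, B collects the digits into a list in one do-while pass and returns [len, min, max] via the built-in reductions.
import Mathlib
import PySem

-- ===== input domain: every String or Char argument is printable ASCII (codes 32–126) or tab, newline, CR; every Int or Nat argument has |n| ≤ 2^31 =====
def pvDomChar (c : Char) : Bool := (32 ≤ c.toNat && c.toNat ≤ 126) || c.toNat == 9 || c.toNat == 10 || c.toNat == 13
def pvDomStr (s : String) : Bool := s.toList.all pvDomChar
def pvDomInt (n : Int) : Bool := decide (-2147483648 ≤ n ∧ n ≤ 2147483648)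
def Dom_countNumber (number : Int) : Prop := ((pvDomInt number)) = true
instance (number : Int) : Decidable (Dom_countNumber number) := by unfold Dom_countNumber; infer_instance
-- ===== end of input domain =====

-- B collects the digits into a list in one do-while pass and returns [len, min, max]
-- via built-in reductions instead of A's online count/min/max tracking (objective: simpler).


-- ===== PORT A =====
-- A's while loop over the state (number, count, minimum, maximum)
def countNumberLoopA (number count minimum maximum : Int) : List Int :=
  if h : number > 0 then
    let store := PySem.Int.mod number 10
    countNumberLoopA (PySem.Int.floordiv number 10) (count + 1)
      (if minimum > store then store else minimum)
      (if maximum < store then store else maximum)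
  else
    [count, minimum, maximum]
termination_by number.toNat
decreasing_by
  simp only [PySem.Int.floordiv_eq_ediv_of_pos (by norm_num : (0:Int) < 10)]
  omega

def countNumber (number : Int) : List Int :=
  countNumberLoopA (PySem.Int.floordiv number 10) 1
    (PySem.Int.mod number 10) (PySem.Int.mod number 10)

-- ===== PORT B =====
-- B's while loop: append remaining digits to the accumulator list
def countNumberLoopB (number : Int) (digits : List Int) : List Int :=
  if _h : number > 0 then
    countNumberLoopB (PySem.Int.floordiv number 10) (digits ++ [PySem.Int.mod number 10])
  else
    digits
termination_by number.toNat
decreasing_by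
  simp only [PySem.Int.floordiv_eq_ediv_of_pos (by norm_num : (0:Int) < 10)]
  omega

def countNumber_alt (number : Int) : List Int :=
  let digits := countNumberLoopB (PySem.Int.floordiv number 10) [PySem.Int.mod number 10]
  -- min(digits)/max(digits): digits is always nonempty, so .getD 0 is never used
  [(digits.length : Int),
   (PySem.List.min? digits (fun y => y)).getD 0,
   (PySem.List.max? digits (fun y => y)).getD 0]

-- ===== PRECONDITION & SPEC =====
def Spec_countNumber (number : Int) (out : List Int) : Prop := out = countNumber_alt number
instance (number : Int) (out : List Int) : Decidable (Spec_countNumber number out) := by unfold Spec_countNumber; infer_instance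

-- ===== CLAIM (what is proved, stated in full; the proofs are below) =====
def Claim_equal_countNumber : Prop := ∀ (number : Int), Dom_countNumber number → Spec_countNumber number (countNumber number)

-- ===== LEMMAS AND PROOFS =====

-- the pure list of digits the loops traverse
def pvDigits (number : Int) : List Int :=
  if _h : number > 0 then
    PySem.Int.mod number 10 :: pvDigits (PySem.Int.floordiv number 10)
  else
    []
termination_by number.toNat
decreasing_by
  simp only [PySem.Int.floordiv_eq_ediv_of_pos (by norm_num : (0:Int) < 10)]
  omega

theorem countNumberLoopB_eq (number : Int) : ∀ digits,
    countNumberLoopB number digits = digits ++ pvDigits number := by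
  fun_induction pvDigits number with
  | case1 n h ih =>
    intro digits
    rw [countNumberLoopB, dif_pos h, ih]
    simp
  | case2 n h =>
    intro digits
    rw [countNumberLoopB, dif_neg h]
    simp

theorem countNumberLoopA_eq (number : Int) : ∀ count minimum maximum,
    countNumberLoopA number count minimum maximum =
      [count + (pvDigits number).length,
       (pvDigits number).foldl min minimum,
       (pvDigits number).foldl max maximum] := by
  fun_induction pvDigits number with
  | case1 n h ih =>
    intro c mi ma
    rw [countNumberLoopA, dif_pos h, ih]
    simp only [List.length_cons, List.foldl_cons, List.cons.injEq, and_true]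
    refine ⟨by push_cast; ring, ?_, ?_⟩
    · congr 1
      simp only [min_def]; split_ifs <;> omega
    · congr 1
      simp only [max_def]; split_ifs <;> omega
  | case2 n h =>
    intro c mi ma
    rw [countNumberLoopA, dif_neg h]
    simp

-- ===== VERDICT (by name: the statement is the Claim_ definition above) =====
theorem countNumber_spec : Claim_equal_countNumber := by
  intro number _
  unfold Spec_countNumber countNumber countNumber_alt
  rw [countNumberLoopA_eq, countNumberLoopB_eq]
  simp [PySem.List.min?_id_cons, PySem.List.max?_id_cons]
  ring
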